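-- pv_equiv track=rewrite | github.com/ethanfurman/pyzapp | pyzapp/xaml/__main__.py | split_streams
-- ===== SOURCE A (Python) =====
-- def split_streams(text_lines):
--     '''
--     Return a list of text streams from a list of lines, one for each !!! declaration after data.
--     '''
--     current = []
--     streams = [current]
--     data_started = False
--     for lineno, line in enumerate(text_lines):
--         if line is None:
--             pass
--         elif line.startswith('!!!'):
--             if data_started:
--                 # last "file" ended, next one begins
--                 current = []
--                 streams.append(current)
--                 data_started = False
--         elif line.strip():
--             data_started = True
--         current.append(line)
--     return streams
-- ===== SOURCE B (Python) =====
-- def split_streams(text_lines):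
--     '''
--     Return a list of text streams from a list of lines, one for each !!! declaration after data.
--     '''
--     # phase 1: find the indices where a new stream begins (a !!! marker after data)
--     cuts = []
--     data_started = False
--     for i, line in enumerate(text_lines):
--         if line is None:
--             continue
--         if line.startswith('!!!'):
--             if data_started:
--                 cuts.append(i)
--                 data_started = False
--         elif line.strip():
--             data_started = True
--     # phase 2: slice the input at those boundaries (each marker starts the next slice)
--     streams = []
--     prev = 0
--     for i in cuts:
--         streams.append(text_lines[prev:i])
--         prev = i
--     streams.append(text_lines[prev:])
--     return streams
-- ===== Notes on version B (the rewrite author's own statement) =====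
-- stated objective: alternative
-- what changed: A accumulates every line element-by-element into the current stream inside one state-machine loop; B first computes only the cut indices (markers seen after data) in one scan and then reconstructs the streams by slicing the input list at those boundaries.
import Mathlib
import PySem

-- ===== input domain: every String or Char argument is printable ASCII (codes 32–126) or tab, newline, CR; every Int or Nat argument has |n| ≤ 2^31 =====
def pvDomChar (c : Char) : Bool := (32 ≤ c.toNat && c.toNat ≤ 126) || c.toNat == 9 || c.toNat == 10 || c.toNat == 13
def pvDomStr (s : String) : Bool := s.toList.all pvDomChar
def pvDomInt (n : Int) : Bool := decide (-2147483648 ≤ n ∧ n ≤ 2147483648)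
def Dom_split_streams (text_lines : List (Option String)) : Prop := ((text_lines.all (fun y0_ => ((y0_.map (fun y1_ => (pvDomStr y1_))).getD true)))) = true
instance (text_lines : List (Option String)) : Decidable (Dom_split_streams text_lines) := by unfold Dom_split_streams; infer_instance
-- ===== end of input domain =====

-- B replaces A's element-by-element stream accumulation by a cut-index scan plus slicing (alternative decomposition, same cost).

-- ===== PORT A =====
-- Python's `current` is mutated in place while `streams` holds a reference to it;
-- modelled as (done, current, data_started) with final result done ++ [current].
def pvAStep (st : List (List (Option String)) × List (Option String) × Bool) (line : Option String) :
    List (List (Option String)) × List (Option String) × Bool :=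
  match line with
  | none => (st.1, st.2.1 ++ [none], st.2.2)
  | some s =>
    if PySem.Str.startswith s "!!!" then
      if st.2.2 then (st.1 ++ [st.2.1], [some s], false)
      else (st.1, st.2.1 ++ [some s], st.2.2)
    else if PySem.Str.strip s ≠ "" then (st.1, st.2.1 ++ [some s], true)
    else (st.1, st.2.1 ++ [some s], st.2.2)

def split_streams (text_lines : List (Option String)) : List (List (Option String)) :=
  let fin := text_lines.foldl pvAStep ([], [], false)
  fin.1 ++ [fin.2.1]

-- ===== PORT B =====
-- phase 1: collect the cut indices (markers after data) via one scan over enumerate(text_lines)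
def pvCutStep (st : List Int × Bool) (p : Int × Option String) : List Int × Bool :=
  match p.2 with
  | none => st
  | some s =>
    if PySem.Str.startswith s "!!!" then
      if st.2 then (st.1 ++ [p.1], false) else st
    else if PySem.Str.strip s ≠ "" then (st.1, true)
    else st

def split_streams_alt (text_lines : List (Option String)) : List (List (Option String)) :=
  let cuts := ((PySem.List.enumerate text_lines).foldl pvCutStep ([], false)).1
  -- phase 2: slice the input at those boundaries
  let r := cuts.foldl
    (fun (st : List (List (Option String)) × Int) i =>
      (st.1 ++ [PySem.List.slice text_lines (some st.2) (some i)], i)) ([], 0)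
  r.1 ++ [PySem.List.slice text_lines (some r.2) none]

-- ===== PRECONDITION & SPEC =====
def Spec_split_streams (text_lines : List (Option String)) (out : List (List (Option String))) : Prop := out = split_streams_alt text_lines
instance (text_lines : List (Option String)) (out : List (List (Option String))) : Decidable (Spec_split_streams text_lines out) := by unfold Spec_split_streams; infer_instance

-- ===== CLAIM (what is proved, stated in full; the proofs are below) =====
def Claim_equal_split_streams : Prop := ∀ (text_lines : List (Option String)), Dom_split_streams text_lines → Spec_split_streams text_lines (split_streams text_lines)

-- ===== LEMMAS AND PROOFS =====

-- reference semantics: the streams of `lines`, given data_started = ds, built back-to-front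
def pvChunks : List (Option String) → Bool → List (List (Option String))
  | [], _ => [[]]
  | line :: t, ds =>
    match line with
    | none => (pvChunks t ds).modifyHead (none :: ·)
    | some s =>
      if PySem.Str.startswith s "!!!" then
        if ds then [] :: (pvChunks t false).modifyHead (some s :: ·)
        else (pvChunks t ds).modifyHead (some s :: ·)
      else if PySem.Str.strip s ≠ "" then (pvChunks t true).modifyHead (some s :: ·)
      else (pvChunks t ds).modifyHead (some s :: ·)

theorem pv_modid {α : Type} (l : List (List α)) : l.modifyHead (fun x => x) = l := by
  cases l <;> simp

-- A's loop computes pvChunks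
theorem pvA_loop (lines : List (Option String)) :
    ∀ (done : List (List (Option String))) (cur : List (Option String)) (ds : Bool),
    (lines.foldl pvAStep (done, cur, ds)).1 ++ [(lines.foldl pvAStep (done, cur, ds)).2.1]
      = done ++ (pvChunks lines ds).modifyHead (cur ++ ·) := by
  induction lines with
  | nil => intro done cur ds; simp [pvChunks]
  | cons h t ih =>
    intro done cur ds
    match h with
    | none =>
      simp only [List.foldl_cons, pvAStep, pvChunks]
      rw [ih]
      cases pvChunks t ds <;> simp
    | some s =>
      simp only [List.foldl_cons, pvAStep, pvChunks]
      split_ifs with h1 h2 h3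
      · rw [ih]; cases pvChunks t false <;> simp
      · rw [ih]; cases pvChunks t ds <;> simp
      · rw [ih]; cases pvChunks t true <;> simp
      · rw [ih]; cases pvChunks t ds <;> simp

-- cut indices, recursively, starting at index k
def pvCutsRec : List (Option String) → Nat → Bool → List Int
  | [], _, _ => []
  | line :: t, k, ds =>
    match line with
    | none => pvCutsRec t (k + 1) ds
    | some s =>
      if PySem.Str.startswith s "!!!" then
        if ds then (k : Int) :: pvCutsRec t (k + 1) false
        else pvCutsRec t (k + 1) ds
      else if PySem.Str.strip s ≠ "" then pvCutsRec t (k + 1) true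
      else pvCutsRec t (k + 1) ds

theorem pvB_cuts (lines : List (Option String)) :
    ∀ (k : Nat) (acc : List Int) (ds : Bool),
    ((PySem.List.enumerate lines (k : Int)).foldl pvCutStep (acc, ds)).1
      = acc ++ pvCutsRec lines k ds := by
  induction lines with
  | nil => intro k acc ds; simp [PySem.List.enumerate_nil, pvCutsRec]
  | cons h t ih =>
    intro k acc ds
    rw [PySem.List.enumerate_cons]
    have hk1 : (k : Int) + 1 = ((k + 1 : Nat) : Int) := by push_cast; ring
    match h with
    | none =>
      simp only [List.foldl_cons, pvCutStep, pvCutsRec, hk1, ih]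
    | some s =>
      simp only [List.foldl_cons, pvCutStep, pvCutsRec]
      split_ifs <;> (rw [hk1, ih]; try simp)

-- the slicing phase, recursively
def pvSlices (full : List (Option String)) (prev : Int) : List Int → List (List (Option String))
  | [] => [PySem.List.slice full (some prev) none]
  | i :: cs => PySem.List.slice full (some prev) (some i) :: pvSlices full i cs

theorem pvB_phase2 (full : List (Option String)) (cuts : List Int) :
    ∀ (ss : List (List (Option String))) (prev : Int),
    (cuts.foldl
      (fun (st : List (List (Option String)) × Int) i =>
        (st.1 ++ [PySem.List.slice full (some st.2) (some i)], i)) (ss, prev)).1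
      ++ [PySem.List.slice full
            (some (cuts.foldl
              (fun (st : List (List (Option String)) × Int) i =>
                (st.1 ++ [PySem.List.slice full (some st.2) (some i)], i)) (ss, prev)).2) none]
      = ss ++ pvSlices full prev cuts := by
  induction cuts with
  | nil => intro ss prev; simp [pvSlices]
  | cons i cs ih =>
    intro ss prev
    simp only [List.foldl_cons, pvSlices]
    rw [ih]; simp

-- a contiguous piece of `full`
theorem pv_piece_ext (full : List (Option String)) (h : Option String) (t : List (Option String))
    (prev k : Nat) (hk : full.drop k = h :: t) (hpk : prev ≤ k) :
    (full.drop prev).take (k + 1 - prev) = (full.drop prev).take (k - prev) ++ [h] := by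
  have hlen : k < full.length := by
    by_contra hc
    rw [List.drop_eq_nil_of_le (by omega)] at hk
    exact absurd hk (by simp)
  have hx : (full.drop prev)[k - prev]? = some h := by
    rw [List.getElem?_drop]
    have : prev + (k - prev) = k := by omega
    rw [this]
    have := congrArg (fun l => l[0]?) hk
    simpa [List.getElem?_drop] using this
  have : k + 1 - prev = (k - prev) + 1 := by omega
  rw [this, List.take_add_one, hx]
  simp

-- key lemma: slicing at the recursive cut indices yields pvChunks
theorem pvB_key (lines : List (Option String)) :
    ∀ (full : List (Option String)) (k prev : Nat) (ds : Bool),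
    full.drop k = lines → prev ≤ k →
    pvSlices full (prev : Int) (pvCutsRec lines k ds)
      = (pvChunks lines ds).modifyHead (((full.drop prev).take (k - prev)) ++ ·) := by
  induction lines with
  | nil =>
    intro full k prev ds hk hpk
    have hlen : full.length ≤ k := by
      by_contra hc
      have := List.drop_eq_nil_iff.mp hk
      omega
    have htake : (full.drop prev).take (k - prev) = full.drop prev :=
      List.take_of_length_le (by simp; omega)
    simp only [pvCutsRec, pvSlices, pvChunks, List.modifyHead]
    rw [PySem.List.slice_from_natCast, htake]
    simp
  | cons h t ih =>
    intro full k prev ds hk hpk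
    have hdt : full.drop (k + 1) = t := by
      have h1 : full.drop (k + 1) = (full.drop k).drop 1 := by
        rw [List.drop_drop]
      rw [h1, hk]; simp
    have hpiece := pv_piece_ext full h t prev k hk hpk
    match h with
    | none =>
      simp only [pvCutsRec, pvChunks]
      rw [ih full (k + 1) prev ds hdt (by omega)]
      cases pvChunks t ds <;> simp [hpiece]
    | some s =>
      simp only [pvCutsRec, pvChunks]
      split_ifs with h1 h2 h3
      · -- marker after data: cut at k
        simp only [pvSlices]
        rw [ih full (k + 1) k false hdt (by omega)]
        have h1p := pv_piece_ext full (some s) t k k hk (le_refl k)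
        have hkk : k + 1 - k = 1 := by omega
        simp only [hkk, Nat.sub_self, List.take_zero, List.nil_append] at h1p
        rw [PySem.List.slice_natCast]
        cases pvChunks t false <;> simp [h1p]
      · rw [ih full (k + 1) prev ds hdt (by omega)]
        cases pvChunks t ds <;> simp [hpiece]
      · rw [ih full (k + 1) prev true hdt (by omega)]
        cases pvChunks t true <;> simp [hpiece]
      · rw [ih full (k + 1) prev ds hdt (by omega)]
        cases pvChunks t ds <;> simp [hpiece]

-- ===== VERDICT (by name: the statement is the Claim_ definition above) =====
theorem split_streams_spec : Claim_equal_split_streams := by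
  intro text_lines _
  unfold Spec_split_streams split_streams split_streams_alt
  have hA := pvA_loop text_lines [] [] false
  simp only [List.nil_append, pv_modid] at hA
  have hC : ((PySem.List.enumerate text_lines).foldl pvCutStep ([], false)).1
      = pvCutsRec text_lines 0 false := by
    have := pvB_cuts text_lines 0 [] false
    simpa using this
  have hK := pvB_key text_lines text_lines 0 0 false (by simp) (le_refl 0)
  simp only [Nat.sub_self, List.drop_zero, List.take_zero, Nat.cast_zero,
    List.modifyHead] at hK
  have hP := pvB_phase2 text_lines (pvCutsRec text_lines 0 false) [] 0
  simp only [List.nil_append] at hP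
  simp only [hA, hC]
  rw [hP, hK]
  cases pvChunks text_lines false <;> simp
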